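-- pv_equiv track=rewrite | github.com/empathystorm/Yandex.Training | training_1.0/7_event sorting/task_b.py | count_ranges_within_points
-- ===== SOURCE A (Python) =====
-- def count_ranges_within_points(n, m, rangeSt, rangeEnd, points):
--     ranges = []
--     for i in range(n):
--         ranges.append((rangeSt[i], -1))
--         ranges.append((rangeEnd[i], 1))
--     for i in range(m):
--         ranges.append((points[i], 0, i))
--     ranges.sort()
--     count = 0
--     ans = [0] * m
--     for r in ranges:
--         if r[1] == -1:
--             count += 1
--         elif r[1] == 1:
--             count -= 1
--         else:
--             ans[r[2]] = count
--     return ans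
-- ===== SOURCE B (Python) =====
-- def _bisect_right(a, x):
--     lo, hi = 0, len(a)
--     while lo < hi:
--         mid = (lo + hi) // 2
--         if x < a[mid]:
--             hi = mid
--         else:
--             lo = mid + 1
--     return lo
--
--
-- def _bisect_left(a, x):
--     lo, hi = 0, len(a)
--     while lo < hi:
--         mid = (lo + hi) // 2
--         if a[mid] < x:
--             lo = mid + 1
--         else:
--             hi = mid
--     return lo
--
--
-- def count_ranges_within_points(n, m, rangeSt, rangeEnd, points):
--     starts = sorted(rangeSt[j] for j in range(n))
--     ends = sorted(rangeEnd[j] for j in range(n))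
--     ans = []
--     for i in range(m):
--         x = points[i]
--         ans.append(_bisect_right(starts, x) - _bisect_left(ends, x))
--     return ans
-- ===== Notes on version B (the rewrite author's own statement) =====
-- stated objective: alternative
-- what changed: Replaced the merged build-events/sort/sweep algorithm by two independently sorted value arrays queried per point with hand-written binary search: ans[i] = bisect_right(sorted starts, x) - bisect_left(sorted ends, x).
import Mathlib
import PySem

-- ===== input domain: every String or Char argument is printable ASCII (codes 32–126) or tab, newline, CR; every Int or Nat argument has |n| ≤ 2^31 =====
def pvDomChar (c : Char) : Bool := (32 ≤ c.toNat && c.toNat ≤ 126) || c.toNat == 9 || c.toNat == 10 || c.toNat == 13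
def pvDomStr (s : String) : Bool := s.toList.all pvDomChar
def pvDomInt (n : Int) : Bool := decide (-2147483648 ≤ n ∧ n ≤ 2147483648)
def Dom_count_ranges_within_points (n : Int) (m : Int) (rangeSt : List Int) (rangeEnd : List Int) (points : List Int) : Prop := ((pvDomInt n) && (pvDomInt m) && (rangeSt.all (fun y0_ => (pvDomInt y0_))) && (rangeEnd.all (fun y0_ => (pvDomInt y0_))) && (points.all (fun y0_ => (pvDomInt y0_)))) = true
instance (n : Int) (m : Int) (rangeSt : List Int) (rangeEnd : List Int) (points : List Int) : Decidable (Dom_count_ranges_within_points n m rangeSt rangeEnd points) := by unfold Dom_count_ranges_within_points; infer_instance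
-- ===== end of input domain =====

-- B replaces A's merged build-events/sort/sweep by two independently sorted value arrays
-- queried per point with binary search: an alternative algorithm, not claimed faster.

-- ===== PORT A =====
-- Python's 2-tuples (v, ±1) are modelled as triples (v, ±1, 0).  This is exact: Python
-- never compares the third slot of a point 3-tuple against a 2-tuple (their second slots
-- differ), and the stable sort keyed on (value, tag) keeps equal point keys in insertion
-- order — which is increasing point index — so it reproduces Python's full-tuple
-- lexicographic ranges.sort() exactly.
def count_ranges_within_points (n : Int) (m : Int) (rangeSt : List Int) (rangeEnd : List Int) (points : List Int) : List Int :=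
  let ranges : List (Int × Int × Int) :=
    (PySem.List.pyRange 0 n 1).foldl
      (fun acc i =>
        acc ++ [(PySem.List.pyGetD rangeSt i 0, -1, 0)]
            ++ [(PySem.List.pyGetD rangeEnd i 0, 1, 0)]) []
  let ranges :=
    (PySem.List.pyRange 0 m 1).foldl
      (fun acc i => acc ++ [(PySem.List.pyGetD points i 0, 0, i)]) ranges
  let ranges := PySem.List.sorted2 ranges (fun r => r.1) (fun r => r.2.1)
  let st := ranges.foldl
      (fun (st : Int × List Int) r =>
        if r.2.1 = -1 then (st.1 + 1, st.2)
        else if r.2.1 = 1 then (st.1 - 1, st.2)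
        else (st.1, PySem.List.pySetD st.2 r.2.2 st.1))
      (0, PySem.List.pyRepeat [0] m)
  st.2

-- ===== PORT B =====
-- B's hand-written _bisect_right/_bisect_left are verbatim the standard bisect algorithm,
-- ported as the prelude's PySem.List.bisectRight/bisectLeft (exact same loop).
def count_ranges_within_points_alt (n : Int) (m : Int) (rangeSt : List Int) (rangeEnd : List Int) (points : List Int) : List Int :=
  let starts := PySem.List.sorted
    ((PySem.List.pyRange 0 n 1).map (fun j => PySem.List.pyGetD rangeSt j 0)) (fun v => v) false
  let ends := PySem.List.sorted
    ((PySem.List.pyRange 0 n 1).map (fun j => PySem.List.pyGetD rangeEnd j 0)) (fun v => v) false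
  (PySem.List.pyRange 0 m 1).foldl
    (fun ans i =>
      ans ++ [let x := PySem.List.pyGetD points i 0
              ((PySem.List.bisectRight starts x : Int) - (PySem.List.bisectLeft ends x : Int))])
    []


-- ===== PRECONDITION & SPEC =====
-- Pre_ excludes exactly the inputs on which Python A raises IndexError (n exceeding the
-- length of rangeSt or rangeEnd, or m exceeding the length of points); B raises there too.
def Pre_count_ranges_within_points (n : Int) (m : Int) (rangeSt : List Int) (rangeEnd : List Int) (points : List Int) : Prop :=
  n ≤ (rangeSt.length : Int) ∧ n ≤ (rangeEnd.length : Int) ∧ m ≤ (points.length : Int)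
instance (n : Int) (m : Int) (rangeSt : List Int) (rangeEnd : List Int) (points : List Int) : Decidable (Pre_count_ranges_within_points n m rangeSt rangeEnd points) := by unfold Pre_count_ranges_within_points; infer_instance
def pvWitness_count_ranges_within_points : Int × Int × List Int × List Int × List Int := (2, 3, [1, 5], [3, 7], [2, 6, 0])

def Spec_count_ranges_within_points (n : Int) (m : Int) (rangeSt : List Int) (rangeEnd : List Int) (points : List Int) (out : List Int) : Prop := out = count_ranges_within_points_alt n m rangeSt rangeEnd points
instance (n : Int) (m : Int) (rangeSt : List Int) (rangeEnd : List Int) (points : List Int) (out : List Int) : Decidable (Spec_count_ranges_within_points n m rangeSt rangeEnd points out) := by unfold Spec_count_ranges_within_points; infer_instance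

-- ===== CLAIM (what is proved, stated in full; the proofs are below) =====
def Claim_equal_count_ranges_within_points : Prop := ∀ (n : Int) (m : Int) (rangeSt : List Int) (rangeEnd : List Int) (points : List Int), Dom_count_ranges_within_points n m rangeSt rangeEnd points → Pre_count_ranges_within_points n m rangeSt rangeEnd points → Spec_count_ranges_within_points n m rangeSt rangeEnd points (count_ranges_within_points n m rangeSt rangeEnd points)

-- ===== LEMMAS AND PROOFS =====

def pvR (a b : Int × Int × Int) : Prop := a.1 < b.1 ∨ (a.1 = b.1 ∧ a.2.1 ≤ b.2.1)

def pvB2 (a b : Int × Int × Int) : Bool :=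
  decide (a.1 < b.1) || (!decide (b.1 < a.1) && decide (a.2.1 < b.2.1))

lemma pv_sorted2_eq (L : List (Int × Int × Int)) :
    PySem.List.sorted2 L (fun r => r.1) (fun r => r.2.1) false
      = L.foldl (fun acc x => PySem.List.insertBy pvB2 x acc) [] := rfl

lemma pv_insertBy_pairwise (x : Int × Int × Int) (ys : List (Int × Int × Int))
    (h : ys.Pairwise pvR) : (PySem.List.insertBy pvB2 x ys).Pairwise pvR := by
  induction ys with
  | nil => simp [PySem.List.insertBy]
  | cons y ys ih =>
    rw [List.pairwise_cons] at h
    obtain ⟨hy, hys⟩ := h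
    rw [PySem.List.insertBy]
    by_cases hb : pvB2 x y = true
    · rw [if_pos hb]
      have hxy : pvR x y := by
        simp [pvB2] at hb; unfold pvR; rcases hb with h1 | h1 <;> omega
      refine List.Pairwise.cons ?_ (List.Pairwise.cons hy hys)
      intro z hz
      rcases List.mem_cons.mp hz with rfl | hz
      · exact hxy
      · have := hy z hz
        unfold pvR at *; omega
    · rw [if_neg hb]
      have hyx : pvR y x := by
        simp [pvB2] at hb; unfold pvR; omega
      refine List.Pairwise.cons ?_ (ih hys)
      intro z hz
      rcases (PySem.List.mem_insertBy pvB2 x z ys).mp hz with rfl | hz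
      · exact hyx
      · exact hy z hz

lemma pv_sorted2_pairwise (L : List (Int × Int × Int)) :
    (PySem.List.sorted2 L (fun r => r.1) (fun r => r.2.1) false).Pairwise pvR := by
  rw [pv_sorted2_eq]
  suffices h : ∀ acc : List (Int × Int × Int), acc.Pairwise pvR →
      (L.foldl (fun acc x => PySem.List.insertBy pvB2 x acc) acc).Pairwise pvR by
    exact h [] (by simp)
  induction L with
  | nil => intro acc h; simpa using h
  | cons a L ih => intro acc h; exact ih _ (pv_insertBy_pairwise a acc h)

def pvStep (st : Int × List Int) (r : Int × Int × Int) : Int × List Int :=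
  if r.2.1 = -1 then (st.1 + 1, st.2)
  else if r.2.1 = 1 then (st.1 - 1, st.2)
  else (st.1, PySem.List.pySetD st.2 r.2.2 st.1)

lemma pvStep_start (st : Int × List Int) (r : Int × Int × Int) (h : r.2.1 = -1) :
    pvStep st r = (st.1 + 1, st.2) := by simp [pvStep, h]

lemma pvStep_end (st : Int × List Int) (r : Int × Int × Int) (h : r.2.1 = 1) :
    pvStep st r = (st.1 - 1, st.2) := by simp [pvStep, h]

lemma pvStep_point (st : Int × List Int) (r : Int × Int × Int) (h1 : r.2.1 ≠ -1) (h2 : r.2.1 ≠ 1) :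
    pvStep st r = (st.1, PySem.List.pySetD st.2 r.2.2 st.1) := by simp [pvStep, h1, h2]

lemma pv_sweep_len (L : List (Int × Int × Int)) (c : Int) (a : List Int) :
    (L.foldl pvStep (c, a)).2.length = a.length := by
  induction L generalizing c a with
  | nil => rfl
  | cons r L ih =>
    rw [List.foldl_cons]
    by_cases h1 : r.2.1 = -1
    · rw [pvStep_start _ _ h1]; exact ih _ _
    by_cases h2 : r.2.1 = 1
    · rw [pvStep_end _ _ h2]; exact ih _ _
    · rw [pvStep_point _ _ h1 h2]
      rw [ih]
      exact PySem.List.length_pySetD _ _ _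

lemma pv_sweep_count (L : List (Int × Int × Int)) (c : Int) (a : List Int) :
    (L.foldl pvStep (c, a)).1
      = c + L.countP (fun e => decide (e.2.1 = -1)) - L.countP (fun e => decide (e.2.1 = 1)) := by
  induction L generalizing c a with
  | nil => simp
  | cons r L ih =>
    rw [List.foldl_cons, List.countP_cons, List.countP_cons]
    by_cases h1 : r.2.1 = -1
    · rw [pvStep_start _ _ h1, ih]; simp [h1]; omega
    by_cases h2 : r.2.1 = 1
    · rw [pvStep_end _ _ h2, ih]; simp [h2]; omega
    · rw [pvStep_point _ _ h1 h2, ih]; simp [h1, h2]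

lemma pv_sweep_unset (L : List (Int × Int × Int)) (c : Int) (a : List Int) (j : Nat)
    (h : ∀ e ∈ L, e.2.1 = -1 ∨ e.2.1 = 1 ∨ (0 ≤ e.2.2 ∧ e.2.2 ≠ (j : Int))) :
    (L.foldl pvStep (c, a)).2[j]? = a[j]? := by
  induction L generalizing c a with
  | nil => rfl
  | cons r L ih =>
    rw [List.foldl_cons]
    have hr := h r (by simp)
    have hL : ∀ e ∈ L, e.2.1 = -1 ∨ e.2.1 = 1 ∨ (0 ≤ e.2.2 ∧ e.2.2 ≠ (j : Int)) :=
      fun e he => h e (by simp [he])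
    by_cases h1 : r.2.1 = -1
    · rw [pvStep_start _ _ h1]; exact ih _ _ hL
    by_cases h2 : r.2.1 = 1
    · rw [pvStep_end _ _ h2]; exact ih _ _ hL
    · rw [pvStep_point _ _ h1 h2, ih _ _ hL]
      rcases hr with h' | h' | h'
      · exact absurd h' h1
      · exact absurd h' h2
      · rw [PySem.List.pySetD_of_nonneg _ _ h'.1, List.getElem?_set_ne]
        omega

lemma pv_sweep_main (L₁ L₂ : List (Int × Int × Int)) (x c : Int) (a : List Int) (i : Nat)
    (hi : i < a.length)
    (h2 : ∀ e ∈ L₂, e.2.1 = -1 ∨ e.2.1 = 1 ∨ (0 ≤ e.2.2 ∧ e.2.2 ≠ (i : Int))) :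
    ((L₁ ++ (x, 0, (i : Int)) :: L₂).foldl pvStep (c, a)).2[i]?
      = some (c + L₁.countP (fun e => decide (e.2.1 = -1)) - L₁.countP (fun e => decide (e.2.1 = 1))) := by
  rw [List.foldl_append, List.foldl_cons]
  have hev : pvStep (L₁.foldl pvStep (c, a)) (x, 0, (i : Int))
      = ((L₁.foldl pvStep (c, a)).1, (L₁.foldl pvStep (c, a)).2.set i (L₁.foldl pvStep (c, a)).1) := by
    rw [pvStep_point _ _ (by norm_num) (by norm_num)]
    rw [PySem.List.pySetD_natCast]
  rw [hev, pv_sweep_unset _ _ _ _ h2, List.getElem?_set_self]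
  · rw [pv_sweep_count]
  · rw [pv_sweep_len]; exact hi

def pvVals (l : List Int) (n : Int) : List Int :=
  (PySem.List.pyRange 0 n 1).map (fun j => PySem.List.pyGetD l j 0)

def pvSE (n : Int) (rangeSt rangeEnd : List Int) : List (Int × Int × Int) :=
  (PySem.List.pyRange 0 n 1).flatMap
    (fun i => [(PySem.List.pyGetD rangeSt i 0, -1, 0), (PySem.List.pyGetD rangeEnd i 0, 1, 0)])

def pvPE (m : Int) (points : List Int) : List (Int × Int × Int) :=
  (PySem.List.pyRange 0 m 1).map (fun i => (PySem.List.pyGetD points i 0, 0, i))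

-- membership shapes
lemma pv_mem_SE {n : Int} {rs re : List Int} {e : Int × Int × Int} (h : e ∈ pvSE n rs re) :
    e.2.1 = -1 ∨ e.2.1 = 1 := by
  unfold pvSE at h
  rw [List.mem_flatMap] at h
  obtain ⟨i, _, hi⟩ := h
  rcases List.mem_cons.mp hi with rfl | hi'
  · left; rfl
  · rcases List.mem_cons.mp hi' with rfl | h'
    · right; rfl
    · simp at h'

lemma pv_mem_PE {m : Int} {pts : List Int} {e : Int × Int × Int} (h : e ∈ pvPE m pts) :
    e.2.1 = 0 ∧ 0 ≤ e.2.2 ∧ e.2.2 < m ∧ e.1 = PySem.List.pyGetD pts e.2.2 0 := by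
  unfold pvPE at h
  rw [List.mem_map] at h
  obtain ⟨i, hi, rfl⟩ := h
  rcases PySem.List.mem_pyRange_one.mp hi with ⟨h1, h2⟩
  exact ⟨rfl, h1, h2, rfl⟩

-- counting inside SE / PE
lemma pv_countSE_start (n x : Int) (rs re : List Int) :
    (pvSE n rs re).countP (fun e => decide (e.2.1 = -1) && decide (e.1 ≤ x))
      = (pvVals rs n).countP (fun s => decide (s ≤ x)) := by
  unfold pvSE pvVals
  induction PySem.List.pyRange 0 n 1 with
  | nil => rfl
  | cons i l ih =>
    rw [List.flatMap_cons, List.map_cons, List.countP_append, List.countP_cons, ih]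
    simp [List.countP_cons]
    omega

lemma pv_countSE_end (n x : Int) (rs re : List Int) :
    (pvSE n rs re).countP (fun e => decide (e.2.1 = 1) && decide (e.1 < x))
      = (pvVals re n).countP (fun v => decide (v < x)) := by
  unfold pvSE pvVals
  induction PySem.List.pyRange 0 n 1 with
  | nil => rfl
  | cons i l ih =>
    rw [List.flatMap_cons, List.map_cons, List.countP_append, List.countP_cons, ih]
    simp [List.countP_cons]
    omega

lemma pv_countPE_pi (m : Int) (pts : List Int) (k : Nat) (h0 : (k : Int) < m) :
    (pvPE m pts).countP (fun e => decide (e.2.1 = 0) && decide (e.2.2 = (k : Int))) = 1 := by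
  unfold pvPE
  rw [List.countP_map]
  have h1 : ((fun (e : Int × Int × Int) => decide (e.2.1 = 0) && decide (e.2.2 = (k : Int))) ∘
      (fun i => (PySem.List.pyGetD pts i 0, 0, i))) = fun i => (i == (k : Int)) := by
    funext i
    show (decide ((0:Int) = 0) && decide (i = (k:Int))) = (i == (k:Int))
    simpa using (Bool.beq_eq_decide_eq i ((k:Nat) : Int)).symm
  rw [h1]
  rw [← List.count_eq_countP]
  exact List.count_eq_one_of_mem (PySem.List.nodup_pyRange_one 0 m)
    (PySem.List.mem_pyRange_one.mpr ⟨by positivity, h0⟩)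

-- one-occurrence decomposition
lemma pv_countP_one_split {α : Type} (P : α → Bool) (L : List α) (h : L.countP P = 1) :
    ∃ L₁ e L₂, L = L₁ ++ e :: L₂ ∧ P e = true ∧ L₁.countP P = 0 ∧ L₂.countP P = 0 := by
  induction L with
  | nil => simp at h
  | cons r L ih =>
    rw [List.countP_cons] at h
    by_cases hr : P r = true
    · refine ⟨[], r, L, rfl, hr, rfl, ?_⟩
      simpa [hr] using h
    · have hL : L.countP P = 1 := by simp [hr] at h; omega
      obtain ⟨L₁, e, L₂, rfl, he, h1, h2⟩ := ih hL
      exact ⟨r :: L₁, e, L₂, rfl, he, by simp [hr, h1], h2⟩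

lemma pv_count_start_chain (n m x : Int) (k : Nat) (rs re pts : List Int)
    (L₁ L₂ : List (Int × Int × Int))
    (hperm : (L₁ ++ (x, 0, (k : Int)) :: L₂).Perm (pvSE n rs re ++ pvPE m pts))
    (h₁ : ∀ e ∈ L₁, pvR e (x, 0, (k : Int)))
    (h₂ : ∀ e ∈ L₂, pvR (x, 0, (k : Int)) e) :
    L₁.countP (fun e => decide (e.2.1 = -1))
      = (pvVals rs n).countP (fun s => decide (s ≤ x)) := by
  have step1 : L₁.countP (fun e => decide (e.2.1 = -1))
      = L₁.countP (fun e => decide (e.2.1 = -1) && decide (e.1 ≤ x)) := by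
    refine List.countP_congr (fun e he => ?_)
    have hr : e.1 < x ∨ (e.1 = x ∧ e.2.1 ≤ 0) := h₁ e he
    simp only [Bool.and_eq_true, decide_eq_true_eq]
    constructor
    · intro ht; refine ⟨ht, ?_⟩; omega
    · exact fun h => h.1
  have step2 : (((x, 0, (k : Int)) : Int × Int × Int) :: L₂).countP
      (fun e => decide (e.2.1 = -1) && decide (e.1 ≤ x)) = 0 := by
    rw [List.countP_eq_zero]
    intro e he
    simp only [Bool.and_eq_true, decide_eq_true_eq, not_and]
    intro ht
    rcases List.mem_cons.mp he with rfl | he'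
    · simp at ht
    · have hr : x < e.1 ∨ (x = e.1 ∧ (0:Int) ≤ e.2.1) := h₂ e he'
      rw [ht] at hr
      omega
  have step3 : (L₁ ++ (x, 0, (k : Int)) :: L₂).countP
        (fun e => decide (e.2.1 = -1) && decide (e.1 ≤ x))
      = L₁.countP (fun e => decide (e.2.1 = -1) && decide (e.1 ≤ x)) := by
    rw [List.countP_append, step2]
    omega
  have step4 : (pvPE m pts).countP (fun e => decide (e.2.1 = -1) && decide (e.1 ≤ x)) = 0 := by
    rw [List.countP_eq_zero]
    intro e he
    have := (pv_mem_PE he).1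
    simp [this]
  rw [step1, ← step3, List.Perm.countP_eq _ hperm, List.countP_append, step4,
    pv_countSE_start]
  omega

lemma pv_count_end_chain (n m x : Int) (k : Nat) (rs re pts : List Int)
    (L₁ L₂ : List (Int × Int × Int))
    (hperm : (L₁ ++ (x, 0, (k : Int)) :: L₂).Perm (pvSE n rs re ++ pvPE m pts))
    (h₁ : ∀ e ∈ L₁, pvR e (x, 0, (k : Int)))
    (h₂ : ∀ e ∈ L₂, pvR (x, 0, (k : Int)) e) :
    L₁.countP (fun e => decide (e.2.1 = 1))
      = (pvVals re n).countP (fun v => decide (v < x)) := by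
  have step1 : L₁.countP (fun e => decide (e.2.1 = 1))
      = L₁.countP (fun e => decide (e.2.1 = 1) && decide (e.1 < x)) := by
    refine List.countP_congr (fun e he => ?_)
    have hr : e.1 < x ∨ (e.1 = x ∧ e.2.1 ≤ 0) := h₁ e he
    simp only [Bool.and_eq_true, decide_eq_true_eq]
    constructor
    · intro ht; refine ⟨ht, ?_⟩; omega
    · exact fun h => h.1
  have step2 : (((x, 0, (k : Int)) : Int × Int × Int) :: L₂).countP
      (fun e => decide (e.2.1 = 1) && decide (e.1 < x)) = 0 := by
    rw [List.countP_eq_zero]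
    intro e he
    simp only [Bool.and_eq_true, decide_eq_true_eq, not_and]
    intro ht
    rcases List.mem_cons.mp he with rfl | he'
    · simp at ht
    · have hr : x < e.1 ∨ (x = e.1 ∧ (0:Int) ≤ e.2.1) := h₂ e he'
      rw [ht] at hr
      omega
  have step3 : (L₁ ++ (x, 0, (k : Int)) :: L₂).countP
        (fun e => decide (e.2.1 = 1) && decide (e.1 < x))
      = L₁.countP (fun e => decide (e.2.1 = 1) && decide (e.1 < x)) := by
    rw [List.countP_append, step2]
    omega
  have step4 : (pvPE m pts).countP (fun e => decide (e.2.1 = 1) && decide (e.1 < x)) = 0 := by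
    rw [List.countP_eq_zero]
    intro e he
    have := (pv_mem_PE he).1
    simp [this]
  rw [step1, ← step3, List.Perm.countP_eq _ hperm, List.countP_append, step4,
    pv_countSE_end]
  omega
-- countP of a prefix-true/suffix-false predicate along a list is the split point
lemma pv_countP_eq_of_split (S : List Int) (p : Int → Bool) (k : Nat) (hk : k ≤ S.length)
    (h1 : ∀ (j : Nat) (hj : j < S.length), j < k → p S[j] = true)
    (h2 : ∀ (j : Nat) (hj : j < S.length), k ≤ j → p S[j] = false) :
    S.countP p = k := by
  induction S generalizing k with
  | nil => simp only [List.countP_nil]; simp only [List.length_nil] at hk; omega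
  | cons a S ih =>
    rw [List.countP_cons]
    cases k with
    | zero =>
      have ha : p a = false := h2 0 (by simp) (Nat.zero_le _)
      have hS : S.countP p = 0 := List.countP_eq_zero.mpr (fun x hx => by
        obtain ⟨j, hj, rfl⟩ := List.mem_iff_getElem.mp hx
        have := h2 (j + 1) (by simpa using hj) (Nat.zero_le _)
        simpa using this)
      simp [hS, ha]
    | succ k' =>
      have ha : p a = true := h1 0 (by simp) (by omega)
      rw [ih k' (by simpa using hk)
        (fun j hj hjk => by simpa using h1 (j + 1) (by simpa using hj) (by omega))
        (fun j hj hjk => by simpa using h2 (j + 1) (by simpa using hj) (by omega))]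
      simp [ha]

lemma pv_br_eq (vals : List Int) (x : Int) :
    (PySem.List.bisectRight (PySem.List.sorted vals (fun v => v) false) x : Nat)
      = vals.countP (fun v => decide (v ≤ x)) := by
  set S := PySem.List.sorted vals (fun v => v) false with hS
  have hpw : S.Pairwise (fun a b => a ≤ b) := PySem.List.sorted_pairwise vals (fun v => v)
  obtain ⟨hk, ha, hb⟩ := PySem.List.bisectRight_spec S x hpw
  have h := pv_countP_eq_of_split S (fun v => decide (v ≤ x)) (PySem.List.bisectRight S x) hk
    (fun j hj hjk => by simpa using ha j hj hjk)
    (fun j hj hjk => by simpa using not_le.mpr (hb j hj hjk))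
  rw [← h]
  rw [hS]
  exact List.Perm.countP_eq _ (PySem.List.sorted_perm vals (fun v => v) false)

lemma pv_bl_eq (vals : List Int) (x : Int) :
    (PySem.List.bisectLeft (PySem.List.sorted vals (fun v => v) false) x : Nat)
      = vals.countP (fun v => decide (v < x)) := by
  set S := PySem.List.sorted vals (fun v => v) false with hS
  have hpw : S.Pairwise (fun a b => a ≤ b) := PySem.List.sorted_pairwise vals (fun v => v)
  obtain ⟨hk, ha, hb⟩ := PySem.List.bisectLeft_spec S x hpw
  have h := pv_countP_eq_of_split S (fun v => decide (v < x)) (PySem.List.bisectLeft S x) hk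
    (fun j hj hjk => by simpa using ha j hj hjk)
    (fun j hj hjk => by simpa using not_lt.mpr (hb j hj hjk))
  rw [← h]
  rw [hS]
  exact List.Perm.countP_eq _ (PySem.List.sorted_perm vals (fun v => v) false)

lemma pv_B_eq (n m : Int) (rs re pts : List Int) :
    count_ranges_within_points_alt n m rs re pts
      = (PySem.List.pyRange 0 m 1).map (fun i =>
          (((pvVals rs n).countP (fun s => decide (s ≤ PySem.List.pyGetD pts i 0)) : Int)
           - ((pvVals re n).countP (fun v => decide (v < PySem.List.pyGetD pts i 0)) : Int))) := by
  unfold count_ranges_within_points_alt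
  rw [PySem.List.foldl_append_singleton_eq_map, List.nil_append]
  refine List.map_congr_left (fun i _ => ?_)
  show ((PySem.List.bisectRight _ _ : Int) - (PySem.List.bisectLeft _ _ : Int)) = _
  rw [show ((PySem.List.bisectRight (PySem.List.sorted ((PySem.List.pyRange 0 n 1).map
        (fun j => PySem.List.pyGetD rs j 0)) (fun v => v) false) (PySem.List.pyGetD pts i 0) : Nat) : Int)
      = ((pvVals rs n).countP (fun s => decide (s ≤ PySem.List.pyGetD pts i 0)) : Int) from by
    rw [pv_br_eq]; rfl]
  rw [show ((PySem.List.bisectLeft (PySem.List.sorted ((PySem.List.pyRange 0 n 1).map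
        (fun j => PySem.List.pyGetD re j 0)) (fun v => v) false) (PySem.List.pyGetD pts i 0) : Nat) : Int)
      = ((pvVals re n).countP (fun v => decide (v < PySem.List.pyGetD pts i 0)) : Int) from by
    rw [pv_bl_eq]; rfl]

lemma pv_A_eq (n m : Int) (rs re pts : List Int) :
    count_ranges_within_points n m rs re pts
      = ((PySem.List.sorted2 (pvSE n rs re ++ pvPE m pts) (fun r => r.1) (fun r => r.2.1) false).foldl
          pvStep (0, List.replicate m.toNat 0)).2 := by
  have hz : count_ranges_within_points n m rs re pts
      = ((PySem.List.sorted2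
            ((PySem.List.pyRange 0 m 1).foldl
              (fun acc i => acc ++ [(PySem.List.pyGetD pts i 0, 0, i)])
              ((PySem.List.pyRange 0 n 1).foldl
                (fun acc i =>
                  acc ++ [(PySem.List.pyGetD rs i 0, -1, 0)]
                      ++ [(PySem.List.pyGetD re i 0, 1, 0)]) []))
            (fun r => r.1) (fun r => r.2.1) false).foldl
          pvStep (0, PySem.List.pyRepeat [0] m)).2 := rfl
  rw [hz]
  have h1 : (fun (acc : List (Int × Int × Int)) i =>
        acc ++ [(PySem.List.pyGetD rs i 0, -1, 0)] ++ [(PySem.List.pyGetD re i 0, 1, 0)])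
      = (fun acc i => acc ++ ([(PySem.List.pyGetD rs i 0, (-1 : Int), (0 : Int))]
            ++ [(PySem.List.pyGetD re i 0, 1, 0)])) := by
    funext acc i; rw [List.append_assoc]
  rw [h1, PySem.List.foldl_append_eq_flatMap
        (fun i => [(PySem.List.pyGetD rs i 0, (-1 : Int), (0 : Int))]
            ++ [(PySem.List.pyGetD re i 0, 1, 0)]) (PySem.List.pyRange 0 n 1) []]
  rw [PySem.List.foldl_append_singleton_eq_map
        (fun i => (PySem.List.pyGetD pts i 0, (0 : Int), i)) (PySem.List.pyRange 0 m 1)]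
  rw [PySem.List.pyRepeat_singleton, List.nil_append]
  rfl

theorem pv_main (n m : Int) (rs re pts : List Int) :
    count_ranges_within_points n m rs re pts = count_ranges_within_points_alt n m rs re pts := by
  rw [pv_A_eq, pv_B_eq]
  set L := PySem.List.sorted2 (pvSE n rs re ++ pvPE m pts) (fun r => r.1) (fun r => r.2.1) false with hLdef
  have hperm : L.Perm (pvSE n rs re ++ pvPE m pts) := PySem.List.sorted2_perm _ _ _ _
  have hpw : L.Pairwise pvR := pv_sorted2_pairwise _
  apply List.ext_getElem?
  intro k
  by_cases hk : k < m.toNat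
  · -- both entries are defined
    have hm : (k : Int) < m := by omega
    have hx : ((PySem.List.pyRange 0 m 1).map (fun i =>
          (((pvVals rs n).countP (fun s => decide (s ≤ PySem.List.pyGetD pts i 0)) : Int)
           - ((pvVals re n).countP (fun v => decide (v < PySem.List.pyGetD pts i 0)) : Int))))[k]?
        = some ((((pvVals rs n).countP (fun s => decide (s ≤ PySem.List.pyGetD pts (k : Int) 0)) : Int)
           - ((pvVals re n).countP (fun v => decide (v < PySem.List.pyGetD pts (k : Int) 0)) : Int))) := by
      rw [List.getElem?_map, PySem.List.getElem?_pyRange_one, if_pos (by omega)]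
      simp
    rw [hx]
    set x := PySem.List.pyGetD pts (k : Int) 0 with hxdef
    -- the point event for index k occurs exactly once in L
    have hSEzero : (pvSE n rs re).countP
        (fun e => decide (e.2.1 = 0) && decide (e.2.2 = (k : Int))) = 0 := by
      rw [List.countP_eq_zero]
      intro e he
      have := pv_mem_SE he
      simp only [Bool.and_eq_true, decide_eq_true_eq, not_and]
      intro h0
      omega
    have hcnt : L.countP (fun e => decide (e.2.1 = 0) && decide (e.2.2 = (k : Int))) = 1 := by
      rw [List.Perm.countP_eq _ hperm, List.countP_append, hSEzero, pv_countPE_pi m pts k hm]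
    obtain ⟨L₁, ev, L₂, hdec, hev, h1zero, h2zero⟩ := pv_countP_one_split _ _ hcnt
    have hev' : ev.2.1 = 0 ∧ ev.2.2 = (k : Int) := by
      simpa using hev
    have hmemL : ev ∈ L := by rw [hdec]; simp
    have hmemR : ev ∈ pvSE n rs re ++ pvPE m pts := (List.Perm.mem_iff hperm).mp hmemL
    have hevx : ev = (x, 0, (k : Int)) := by
      rcases List.mem_append.mp hmemR with h | h
      · have := pv_mem_SE h; omega
      · have hp := pv_mem_PE h
        have : ev.1 = x := by rw [hp.2.2.2, hev'.2]
        exact Prod.ext this (Prod.ext hev'.1 hev'.2)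
    rw [hevx] at hdec
    rw [hdec] at hpw hperm ⊢
    obtain ⟨-, hp2, hp3⟩ := List.pairwise_append.mp hpw
    have h₁ : ∀ e ∈ L₁, pvR e (x, 0, (k : Int)) :=
      fun e he => hp3 e he _ (List.mem_cons_self)
    have h₂ : ∀ e ∈ L₂, pvR (x, 0, (k : Int)) e := (List.pairwise_cons.mp hp2).1
    have h2sweep : ∀ e ∈ L₂, e.2.1 = -1 ∨ e.2.1 = 1 ∨ (0 ≤ e.2.2 ∧ e.2.2 ≠ (k : Int)) := by
      intro e he
      have hmem : e ∈ pvSE n rs re ++ pvPE m pts := by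
        refine (List.Perm.mem_iff hperm).mp ?_
        simp [he]
      rcases List.mem_append.mp hmem with h | h
      · rcases pv_mem_SE h with h' | h'
        · exact Or.inl h'
        · exact Or.inr (Or.inl h')
      · have hp := pv_mem_PE h
        refine Or.inr (Or.inr ⟨hp.2.1, ?_⟩)
        have hne := List.countP_eq_zero.mp h2zero e he
        simp only [Bool.and_eq_true, decide_eq_true_eq, not_and] at hne
        exact hne hp.1
    rw [pv_sweep_main L₁ L₂ x 0 (List.replicate m.toNat 0) k (by simpa using hk) h2sweep]
    rw [pv_count_start_chain n m x k rs re pts L₁ L₂ hperm h₁ h₂,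
      pv_count_end_chain n m x k rs re pts L₁ L₂ hperm h₁ h₂]
    congr 1
    omega
  · -- past the end on both sides
    rw [List.getElem?_eq_none, List.getElem?_eq_none]
    · rw [List.length_map, PySem.List.length_pyRange_one]
      omega
    · rw [pv_sweep_len, List.length_replicate]
      omega

-- ===== VERDICT (by name: the statement is the Claim_ definition above) =====
theorem count_ranges_within_points_spec : Claim_equal_count_ranges_within_points := by
  intro n m rangeSt rangeEnd points _ _
  unfold Spec_count_ranges_within_points
  exact pv_main n m rangeSt rangeEnd points
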